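-- pv_equiv track=rewrite | github.com/JunyoungChoi/SW-Expert-Academy | SWexpertAcademy_5203.py | run_
-- ===== SOURCE A (Python) =====
-- def run_(value):
-- 	check=0
-- 	for v in value:
-- 		if v >=1:
-- 			check+=1
-- 		else:
-- 			check=0
-- 		if check >=3:
-- 			return True
-- 	return False
-- ===== SOURCE B (Python) =====
-- def run_(value):
--     i, n = 0, len(value)
--     while i < n:
--         if value[i] >= 1:
--             j = i
--             while j < n and value[j] >= 1:
--                 j += 1
--             if j - i >= 3:
--                 return True
--             i = j
--         else:
--             i += 1
--     return False
-- ===== Notes on version B (the rewrite author's own statement) =====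
-- stated objective: alternative
-- what changed: B scans maximal runs of elements >= 1 and checks each run's length against 3, instead of A's per-element counter with reset.
import Mathlib
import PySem

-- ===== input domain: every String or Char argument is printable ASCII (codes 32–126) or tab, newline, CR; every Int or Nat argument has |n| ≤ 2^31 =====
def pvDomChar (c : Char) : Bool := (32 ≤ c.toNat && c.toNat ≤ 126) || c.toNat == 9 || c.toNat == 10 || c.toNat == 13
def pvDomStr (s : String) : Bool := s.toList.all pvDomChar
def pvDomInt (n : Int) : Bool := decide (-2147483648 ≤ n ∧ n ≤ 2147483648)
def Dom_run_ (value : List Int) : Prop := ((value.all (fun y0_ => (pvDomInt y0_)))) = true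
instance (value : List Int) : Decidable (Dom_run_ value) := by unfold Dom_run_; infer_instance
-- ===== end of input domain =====

-- B scans maximal runs of elements >= 1 (takeWhile/dropWhile) instead of A's per-element counter with reset; alternative decomposition, same cost.


-- ===== PORT A =====
-- per-element loop with a running counter `check`, early return when it reaches 3
def runA (check : Int) : List Int → Bool
  | [] => false
  | v :: t =>
    let c : Int := if 1 ≤ v then check + 1 else 0
    if 3 ≤ c then true else runA c t

def run_ (value : List Int) : Bool := runA 0 value

-- ===== PORT B =====
-- loop over maximal runs: take the run of elements ≥ 1, test its length, drop it
def runB : List Int → Bool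
  | [] => false
  | v :: t =>
    if 1 ≤ v then
      if 3 ≤ ((v :: t).takeWhile (fun x => decide (1 ≤ x))).length then true
      else runB ((v :: t).dropWhile (fun x => decide (1 ≤ x)))
    else runB t
termination_by l => l.length
decreasing_by
  · simp only [List.dropWhile]
    have h := List.length_dropWhile_le (p := fun x => decide (1 ≤ x)) t
    simp_all
  · simp

def run__alt (value : List Int) : Bool := runB value

-- ===== PRECONDITION & SPEC =====
def Spec_run_ (value : List Int) (out : Bool) : Prop := out = run__alt value
instance (value : List Int) (out : Bool) : Decidable (Spec_run_ value out) := by unfold Spec_run_; infer_instance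

-- ===== CLAIM (what is proved, stated in full; the proofs are below) =====
def Claim_equal_run_ : Prop := ∀ (value : List Int), Dom_run_ value → Spec_run_ value (run_ value)

-- ===== LEMMAS AND PROOFS =====

-- unrolling runB one run at a time
theorem runB_eq (t : List Int) :
    runB t = (decide (3 ≤ (t.takeWhile (fun x => decide (1 ≤ x))).length)
              || runB (t.dropWhile (fun x => decide (1 ≤ x)))) := by
  cases t with
  | nil => simp [runB]
  | cons v t =>
    by_cases h : 1 ≤ v
    · rw [runB]
      simp only [h, if_true]
      split_ifs with h3
      · simp [h3]
      · simp [h3]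
    · simp [runB, h, List.takeWhile, List.dropWhile]

-- invariant of A's counter loop
theorem runA_eq (l : List Int) : ∀ c : Int, 0 ≤ c → c < 3 →
    runA c l = (decide (3 ≤ c + ((l.takeWhile (fun x => decide (1 ≤ x))).length : Int))
                || runB (l.dropWhile (fun x => decide (1 ≤ x)))) := by
  induction l with
  | nil => intro c _ hc3; simp [runA, runB]; omega
  | cons v t ih =>
    intro c hc0 hc3
    by_cases h : 1 ≤ v
    · rw [runA]
      simp only [h, if_true, List.takeWhile, List.dropWhile, decide_true]
      by_cases h3 : 3 ≤ c + 1
      · simp only [h3, if_true, List.length_cons]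
        symm
        simp only [Bool.or_eq_true, decide_eq_true_eq]
        left
        push_cast
        omega
      · simp only [h3, if_false]
        rw [ih (c + 1) (by omega) (by omega)]
        congr 1
        rw [decide_eq_decide]
        simp only [List.length_cons]
        push_cast
        omega
    · rw [runA]
      simp only [h, if_false]
      have h03 : ¬ (3 : Int) ≤ 0 := by omega
      simp only [h03, if_false]
      rw [ih 0 le_rfl (by omega)]
      have hv : decide (1 ≤ v) = false := by simp [h]
      simp only [List.takeWhile_cons, List.dropWhile_cons, hv, Bool.false_eq_true, if_false,
        List.length_nil, Nat.cast_zero, add_zero]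
      have hc : decide ((3:Int) ≤ c) = false := by simp; omega
      rw [hc]
      have hr : runB (v :: t) = runB t := by rw [runB]; simp [h]
      rw [hr, runB_eq t]
      simp only [Bool.false_or]
      congr 1
      rw [decide_eq_decide]
      omega

-- ===== VERDICT (by name: the statement is the Claim_ definition above) =====
theorem run__spec : Claim_equal_run_ := by
  intro value _
  unfold Spec_run_ run_ run__alt
  rw [runA_eq value 0 le_rfl (by omega), runB_eq value]
  simp
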